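-- pv_equiv track=rewrite | github.com/daniel-reich/ubiquitous-fiesta | n3zH5NvzPXb2qd5N5_17.py | how_mega_is_it
-- ===== SOURCE A (Python) =====
-- def how_mega_is_it(n):
--     n = abs(n)
--     if n < 100:
--         return "not a mega milestone"
--     p = 1
--     while 10**p <= n:
--         p = p+1
--     return (p-2) * 'MEGA ' + 'milestone'
-- ===== SOURCE B (Python) =====
-- def how_mega_is_it(n):
--     n = abs(n)
--     if n < 100:
--         return "not a mega milestone"
--     return (len(str(n)) - 2) * 'MEGA ' + 'milestone'
-- ===== Notes on version B (the rewrite author's own statement) =====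
-- stated objective: simpler
-- what changed: The while loop that grows a counter until the corresponding power of ten exceeds n is replaced by a direct closed-form digit count via len(str(n)); the counter and the loop disappear.
import Mathlib
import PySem

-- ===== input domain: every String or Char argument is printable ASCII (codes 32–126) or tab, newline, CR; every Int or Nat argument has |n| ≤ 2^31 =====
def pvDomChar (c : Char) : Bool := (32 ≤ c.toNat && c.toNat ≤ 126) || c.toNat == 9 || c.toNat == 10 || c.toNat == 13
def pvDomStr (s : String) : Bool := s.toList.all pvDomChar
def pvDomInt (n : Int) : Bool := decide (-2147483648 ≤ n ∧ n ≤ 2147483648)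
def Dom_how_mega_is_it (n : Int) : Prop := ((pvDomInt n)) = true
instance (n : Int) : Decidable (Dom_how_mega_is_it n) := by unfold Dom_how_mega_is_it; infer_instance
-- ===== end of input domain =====

-- B replaces A's exponential-growing while loop by a closed-form digit count len(str(n)) (objective: simpler).

-- ===== PORT A =====
-- the 'while 10**p <= n: p = p+1' loop of A, returning the final p;
-- the structural fuel only makes the recursion total; n.toNat+1 iterations always suffice (proved in megaLoop_eq_log)
def megaLoopF : Nat → Int → Nat → Nat
  | 0, _, p => p
  | f + 1, n, p => if (10:Int) ^ p ≤ n then megaLoopF f n (p + 1) else p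

def megaLoop (n : Int) (p : Nat) : Nat := megaLoopF (n.toNat + 1) n p

def how_mega_is_it (n : Int) : String :=
  let m := |n|
  if m < 100 then "not a mega milestone"
  else
    let p := megaLoop m 1
    String.ofList (PySem.List.pyRepeat "MEGA ".toList ((p : Int) - 2) ++ "milestone".toList)

-- ===== PORT B =====
def how_mega_is_it_alt (n : Int) : String :=
  let m := |n|
  if m < 100 then "not a mega milestone"
  else
    let d := (PySem.Int.toChars m).length   -- len(str(m))
    String.ofList (PySem.List.pyRepeat "MEGA ".toList ((d : Int) - 2) ++ "milestone".toList)

-- ===== PRECONDITION & SPEC =====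
def Spec_how_mega_is_it (n : Int) (out : String) : Prop := out = how_mega_is_it_alt n
instance (n : Int) (out : String) : Decidable (Spec_how_mega_is_it n out) := by unfold Spec_how_mega_is_it; infer_instance

-- ===== CLAIM (what is proved, stated in full; the proofs are below) =====
def Claim_equal_how_mega_is_it : Prop := ∀ (n : Int), Dom_how_mega_is_it n → Spec_how_mega_is_it n (how_mega_is_it n)

-- ===== LEMMAS AND PROOFS =====

-- exact length of Nat.toDigits via Nat.log
lemma toDigitsCore_len_exact : ∀ (f n : Nat) (acc : List Char), 0 < n → n < f →
    (Nat.toDigitsCore 10 f n acc).length = Nat.log 10 n + 1 + acc.length := by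
  intro f
  induction f with
  | zero => intro n acc h hf; omega
  | succ f ih =>
    intro n acc hn hf
    rw [Nat.toDigitsCore]
    by_cases h10 : n / 10 = 0
    · have hlt : n < 10 := by omega
      have hl0 : Nat.log 10 n = 0 := Nat.log_eq_zero_iff.mpr (Or.inl hlt)
      rw [if_pos h10]
      simp only [List.length_cons, hl0]
      omega
    · have hge : 10 ≤ n := by
        by_contra hc
        exact h10 (Nat.div_eq_of_lt (by omega))
      have hrec : n / 10 < f := by
        have := Nat.div_lt_self (by omega : 0 < n) (by norm_num : 1 < (10:Nat))
        omega
      simp only [h10, if_false]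
      rw [ih (n / 10) (Nat.digitChar (n % 10) :: acc) (by omega) hrec]
      have hlog : Nat.log 10 n = Nat.log 10 (n / 10) + 1 := by
        rw [Nat.log_of_one_lt_of_le (by norm_num) hge]
      rw [hlog]
      simp only [List.length_cons]
      omega

lemma toDigits_len_exact (n : Nat) (hn : 0 < n) :
    (Nat.toDigits 10 n).length = Nat.log 10 n + 1 := by
  have := toDigitsCore_len_exact (n + 1) n [] hn (by omega)
  simpa [Nat.toDigits] using this

lemma toChars_len (m : Int) (hm : 0 < m) :
    (PySem.Int.toChars m).length = Nat.log 10 m.toNat + 1 := by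
  rw [PySem.Int.toChars]
  rw [if_neg (by omega)]
  exact toDigits_len_exact m.toNat (by omega)

-- the loop computes the digit count
lemma megaLoopF_eq_log (m : Int) : ∀ (f p : Nat), 1 ≤ p → (10:Int) ^ (p - 1) ≤ m →
    m < (10:Int) ^ (p - 1 + f) → megaLoopF f m p = Nat.log 10 m.toNat + 1 := by
  intro f
  induction f with
  | zero =>
    intro p hp hlow hhigh
    simp at hhigh
    omega
  | succ f ih =>
    intro p hp hlow hhigh
    rw [megaLoopF]
    by_cases hle : (10:Int) ^ p ≤ m
    · rw [if_pos hle]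
      apply ih (p + 1) (by omega) (by simpa using hle)
      have : p + 1 - 1 + f = p - 1 + (f + 1) := by omega
      rwa [this]
    · rw [if_neg hle]
      rw [not_le] at hle
      have hm0 : 0 < m := lt_of_lt_of_le (pow_pos (by norm_num) _) hlow
      have hcast : ∀ (k : Nat), ((10:Nat) ^ k : Int) = (10:Int) ^ k := by
        intro k; push_cast; ring
      have hlow' : (10:Nat) ^ (p - 1) ≤ m.toNat := by
        have := hcast (p - 1); omega
      have hhigh' : m.toNat < (10:Nat) ^ p := by
        have := hcast p; omega
      have hlog : Nat.log 10 m.toNat = p - 1 := by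
        apply Nat.log_eq_of_pow_le_of_lt_pow hlow'
        have : p - 1 + 1 = p := by omega
        rwa [this]
      omega

lemma megaLoop_eq_log (m : Int) (hm : 1 ≤ m) :
    megaLoop m 1 = Nat.log 10 m.toNat + 1 := by
  rw [megaLoop]
  apply megaLoopF_eq_log m (m.toNat + 1) 1 le_rfl (by simpa using hm)
  have h1 : (m.toNat : Int) < (10:Int) ^ m.toNat := by
    have := Nat.lt_pow_self (by norm_num : 1 < 10) (n := m.toNat)
    have hc : ((10:Nat) ^ m.toNat : Int) = (10:Int) ^ m.toNat := by push_cast; ring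
    omega
  have h2 : (10:Int) ^ m.toNat ≤ (10:Int) ^ (m.toNat + 1) := by
    apply pow_le_pow_right₀ (by norm_num) (by omega)
  have hmt : m = (m.toNat : Int) := by omega
  calc m = (m.toNat : Int) := hmt
  _ < (10:Int) ^ m.toNat := h1
  _ ≤ (10:Int) ^ (m.toNat + 1) := h2
  _ = (10:Int) ^ (1 - 1 + (m.toNat + 1)) := by norm_num

-- ===== VERDICT (by name: the statement is the Claim_ definition above) =====
theorem how_mega_is_it_spec : Claim_equal_how_mega_is_it := by
  intro n _
  unfold Spec_how_mega_is_it how_mega_is_it how_mega_is_it_alt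
  by_cases h : |n| < 100
  · simp [h]
  · simp only [h, if_false]
    have h100 : (100:Int) ≤ |n| := by omega
    rw [megaLoop_eq_log |n| (by omega), toChars_len |n| (by omega)]
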